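-- pv_equiv track=rewrite | github.com/onkar0127/typing-speed-test | main.py | get_life_milestones
-- ===== SOURCE A (Python) =====
-- def get_life_milestones(total_days):
--     milestones = {
--         10000: "10,000 days milestone",
--         15000: "15,000 days milestone",
--         20000: "20,000 days milestone",
--         25000: "25,000 days milestone",
--         30000: "30,000 days milestone"
--     }  # some milestones are created
--     upcoming_milestone = None
--     for days in sorted(milestones.keys()):
--         if total_days < days:
--             upcoming_milestone = (days, milestones[days], days - total_days)
--             break
--     return upcoming_milestone
-- ===== SOURCE B (Python) =====
-- def get_life_milestones(total_days):
--     next_m = max(10000, (total_days // 5000) * 5000 + 5000)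
--     if next_m > 30000:
--         return None
--     return (next_m, f"{next_m:,} days milestone", next_m - total_days)
-- ===== Notes on version B (the rewrite author's own statement) =====
-- stated objective: simpler
-- what changed: Replaced the milestone dictionary and the sorted-keys scan by a closed-form computation: next = max(10000, (total_days//5000)*5000+5000), None if next > 30000, with the label produced by the thousands-separator format.
import Mathlib
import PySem

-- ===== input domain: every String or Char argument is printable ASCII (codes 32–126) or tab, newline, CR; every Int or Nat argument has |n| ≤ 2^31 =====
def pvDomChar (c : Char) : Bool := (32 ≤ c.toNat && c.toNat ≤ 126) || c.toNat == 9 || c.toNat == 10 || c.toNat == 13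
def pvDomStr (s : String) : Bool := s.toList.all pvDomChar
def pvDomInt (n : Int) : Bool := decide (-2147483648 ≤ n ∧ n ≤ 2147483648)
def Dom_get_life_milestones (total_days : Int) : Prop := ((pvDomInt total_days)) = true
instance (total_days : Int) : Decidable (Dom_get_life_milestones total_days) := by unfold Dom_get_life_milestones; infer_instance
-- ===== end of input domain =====

-- B replaces A's dictionary + sorted-keys scan by a closed-form arithmetic computation of the next milestone (simpler).

-- ===== PORT A =====
-- A's loop over sorted(milestones.keys()) with the dict lookup, as structural recursion over
-- the (already key-sorted) association list; 'break' = returning at the first hit.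
def lifeLoopA (total_days : Int) : List (Int × String) → Option (Int × String × Int)
  | [] => none
  | (days, label) :: rest =>
      if total_days < days then some (days, label, days - total_days)
      else lifeLoopA total_days rest

def get_life_milestones (total_days : Int) : Option (Int × String × Int) :=
  lifeLoopA total_days
    [(10000, "10,000 days milestone"), (15000, "15,000 days milestone"),
     (20000, "20,000 days milestone"), (25000, "25,000 days milestone"),
     (30000, "30,000 days milestone")]

-- ===== PORT B =====
-- f"{n:,}" for a nonnegative n (the only use: n is a milestone value): insert a comma after
-- every 3 digits, counting from the right; works on the reversed digit list.
def commaRev : List Char → Nat → List Char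
  | [], _ => []
  | c :: rest, k => if k == 3 then ',' :: c :: commaRev rest 1 else c :: commaRev rest (k + 1)

def fmtComma (n : Int) : String :=
  String.mk ((commaRev (PySem.Int.toStr n).toList.reverse 0).reverse)

def get_life_milestones_alt (total_days : Int) : Option (Int × String × Int) :=
  let next := max 10000 (PySem.Int.floordiv total_days 5000 * 5000 + 5000)
  if next > 30000 then none
  else some (next, fmtComma next ++ " days milestone", next - total_days)

-- ===== PRECONDITION & SPEC =====
def Spec_get_life_milestones (total_days : Int) (out : Option (Int × String × Int)) : Prop := out = get_life_milestones_alt total_days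
instance (total_days : Int) (out : Option (Int × String × Int)) : Decidable (Spec_get_life_milestones total_days out) := by unfold Spec_get_life_milestones; infer_instance

-- ===== CLAIM (what is proved, stated in full; the proofs are below) =====
def Claim_equal_get_life_milestones : Prop := ∀ (total_days : Int), Dom_get_life_milestones total_days → Spec_get_life_milestones total_days (get_life_milestones total_days)

-- ===== LEMMAS AND PROOFS =====
theorem fmt_10000 : fmtComma 10000 ++ " days milestone" = "10,000 days milestone" := by decide
theorem fmt_15000 : fmtComma 15000 ++ " days milestone" = "15,000 days milestone" := by decide
theorem fmt_20000 : fmtComma 20000 ++ " days milestone" = "20,000 days milestone" := by decide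
theorem fmt_25000 : fmtComma 25000 ++ " days milestone" = "25,000 days milestone" := by decide
theorem fmt_30000 : fmtComma 30000 ++ " days milestone" = "30,000 days milestone" := by decide

-- ===== VERDICT (by name: the statement is the Claim_ definition above) =====
theorem get_life_milestones_spec : Claim_equal_get_life_milestones := by
  intro t _
  unfold Spec_get_life_milestones get_life_milestones get_life_milestones_alt
  rw [PySem.Int.floordiv_eq_ediv_of_pos (by norm_num : (0:Int) < 5000)]
  simp only [lifeLoopA]
  by_cases h1 : t < 10000
  · have hm : max (10000:Int) (t / 5000 * 5000 + 5000) = 10000 := by omega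
    simp [h1, hm, fmt_10000]
  · by_cases h2 : t < 15000
    · have hm : max (10000:Int) (t / 5000 * 5000 + 5000) = 15000 := by omega
      simp [h1, h2, hm, fmt_15000]
    · by_cases h3 : t < 20000
      · have hm : max (10000:Int) (t / 5000 * 5000 + 5000) = 20000 := by omega
        simp [h1, h2, h3, hm, fmt_20000]
      · by_cases h4 : t < 25000
        · have hm : max (10000:Int) (t / 5000 * 5000 + 5000) = 25000 := by omega
          simp [h1, h2, h3, h4, hm, fmt_25000]
        · by_cases h5 : t < 30000
          · have hm : max (10000:Int) (t / 5000 * 5000 + 5000) = 30000 := by omega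
            simp [h1, h2, h3, h4, h5, hm, fmt_30000]
          · have hm : (30000:Int) < max 10000 (t / 5000 * 5000 + 5000) := by omega
            simp [h1, h2, h3, h4, h5, hm]
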